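-- pv_equiv track=rewrite | github.com/Jaedong95/python | coding_test/Gym_suit.py | solution
-- ===== SOURCE A (Python) =====
-- def solution(n, lost, reserve):
--     # 빌릴 필요 x
--     s = set(lost) & set(reserve)
--     # 빌려야 함
--     l = set(lost) - s
--     # 빌려줄 수 o
--     r = set(reserve) - s
--
--     for x in sorted(r):
--         if x-1 in l:
--             l.remove(x-1)
--         elif x+1 in l:
--             l.remove(x+1)
--
--     return n - len(l)
-- ===== SOURCE B (Python) =====
-- def solution(n, lost, reserve):
--     # Two-pointer merge over the two sorted deduplicated lists instead of
--     # repeated membership tests and removals on a mutating set.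
--     L = sorted(set(lost) - set(reserve))   # students who still need a suit
--     R = sorted(set(reserve) - set(lost))   # students with a spare suit
--     i = j = 0
--     cnt = 0
--     while i < len(L) and j < len(R):
--         if L[i] + 1 < R[j]:
--             i += 1
--         elif R[j] + 1 < L[i]:
--             j += 1
--         else:
--             cnt += 1
--             i += 1
--             j += 1
--     return n - (len(L) - cnt)
-- ===== Notes on version B (the rewrite author's own statement) =====
-- stated objective: alternative
-- what changed: Replaced A's loop of repeated set-membership tests and in-place set removals by a two-pointer merge over the two sorted deduplicated lists (needy and spare students), counting matches; the result is n - (|needy| - matches).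
import Mathlib
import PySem

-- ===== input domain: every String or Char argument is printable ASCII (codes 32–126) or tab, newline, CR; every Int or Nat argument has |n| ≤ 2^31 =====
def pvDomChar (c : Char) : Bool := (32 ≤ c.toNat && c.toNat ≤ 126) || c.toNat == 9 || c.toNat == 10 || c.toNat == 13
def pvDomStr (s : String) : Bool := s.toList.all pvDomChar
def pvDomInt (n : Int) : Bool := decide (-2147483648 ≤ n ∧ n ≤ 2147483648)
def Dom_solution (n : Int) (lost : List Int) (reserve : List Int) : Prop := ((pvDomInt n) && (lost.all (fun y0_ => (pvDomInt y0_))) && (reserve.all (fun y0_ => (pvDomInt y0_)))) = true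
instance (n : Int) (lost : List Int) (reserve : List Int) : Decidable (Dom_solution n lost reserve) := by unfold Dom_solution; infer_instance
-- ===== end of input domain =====

-- B replaces A's repeated set-membership/removal loop by a two-pointer merge of the two
-- sorted deduplicated lists (alternative decomposition; same asymptotic cost).


-- ===== PORT A =====
-- loop body of A's 'for x in sorted(r)'; 'l.remove(v)' is guarded by 'v in l', so remove? is
-- always 'some' here and '.getD l' is never the fallback
def stepA (l : PySem.Set Int) (x : Int) : PySem.Set Int :=
  if PySem.Set.contains l (x - 1) then (PySem.Set.remove? l (x - 1)).getD l
  else if PySem.Set.contains l (x + 1) then (PySem.Set.remove? l (x + 1)).getD l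
  else l

def solution (n : Int) (lost : List Int) (reserve : List Int) : Int :=
  let s := PySem.Set.inter (PySem.Set.ofList lost) (PySem.Set.ofList reserve)
  let l := PySem.Set.diff (PySem.Set.ofList lost) s
  let r := PySem.Set.diff (PySem.Set.ofList reserve) s
  let lFinal := (PySem.List.sorted r (fun x => x) false).foldl stepA l
  n - (lFinal.length : Int)

-- ===== PORT B =====
-- the while loop of Source B, with the two indices replaced by the unseen suffixes of L and R
def twoPtr (L R : List Int) : Int :=
  match L, R with
  | [], _ => 0
  | _ :: _, [] => 0
  | a :: L', x :: R' =>
    if a + 1 < x then twoPtr L' (x :: R')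
    else if x + 1 < a then twoPtr (a :: L') R'
    else 1 + twoPtr L' R'
termination_by L.length + R.length

def solution_alt (n : Int) (lost : List Int) (reserve : List Int) : Int :=
  let L := PySem.List.sorted (PySem.Set.diff (PySem.Set.ofList lost) (PySem.Set.ofList reserve)) (fun x => x) false
  let R := PySem.List.sorted (PySem.Set.diff (PySem.Set.ofList reserve) (PySem.Set.ofList lost)) (fun x => x) false
  n - ((L.length : Int) - twoPtr L R)

-- ===== PRECONDITION & SPEC =====
def Spec_solution (n : Int) (lost : List Int) (reserve : List Int) (out : Int) : Prop := out = solution_alt n lost reserve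
instance (n : Int) (lost : List Int) (reserve : List Int) (out : Int) : Decidable (Spec_solution n lost reserve out) := by unfold Spec_solution; infer_instance

-- ===== CLAIM (what is proved, stated in full; the proofs are below) =====
def Claim_equal_solution : Prop := ∀ (n : Int) (lost : List Int) (reserve : List Int), Dom_solution n lost reserve → Spec_solution n lost reserve (solution n lost reserve)

-- ===== LEMMAS AND PROOFS =====

-- abstract match count of A's greedy, recursing over the reserve list
def gcount (l : List Int) (R : List Int) : Int :=
  match R with
  | [] => 0
  | x :: R' =>
    if (x - 1) ∈ l then 1 + gcount (PySem.Set.discard l (x - 1)) R'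
    else if (x + 1) ∈ l then 1 + gcount (PySem.Set.discard l (x + 1)) R'
    else gcount l R'

theorem length_discard_add_one {l : List Int} {v : Int} (hn : l.Nodup) (hv : v ∈ l) :
    (PySem.Set.discard l v).length + 1 = l.length := by
  induction l with
  | nil => simp at hv
  | cons b l' ih =>
    simp only [List.nodup_cons] at hn
    rcases List.mem_cons.mp hv with hbv | hvl
    · subst hbv
      simp [PySem.Set.discard]
      intro a ha h
      exact hn.1 (h ▸ ha)
    · have hbv : b ≠ v := fun h => hn.1 (h ▸ hvl)
      simp only [PySem.Set.discard, List.filter_cons]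
      rw [if_pos (by simp [hbv])]
      simp only [List.length_cons]
      rw [← ih hn.2 hvl]
      rfl

theorem nodup_discard' {l : List Int} (v : Int) (hn : l.Nodup) : (PySem.Set.discard l v).Nodup :=
  List.Nodup.filter _ hn

theorem foldA_length (R : List Int) : ∀ (l : List Int), l.Nodup →
    ((R.foldl stepA l).length : Int) = (l.length : Int) - gcount l R := by
  induction R with
  | nil => intro l _; simp [gcount]
  | cons x R' ih =>
    intro l hn
    simp only [List.foldl_cons, gcount]
    by_cases h1 : (x - 1) ∈ l
    · have hstep : stepA l x = PySem.Set.discard l (x - 1) := by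
        simp [stepA, h1, PySem.Set.remove?_of_mem h1]
      rw [hstep, if_pos h1, ih _ (nodup_discard' _ hn)]
      have := length_discard_add_one hn h1
      omega
    · by_cases h2 : (x + 1) ∈ l
      · have hstep : stepA l x = PySem.Set.discard l (x + 1) := by
          simp only [stepA]
          simp [h1, h2, PySem.Set.remove?_of_mem h2]
        rw [hstep, if_neg h1, if_pos h2, ih _ (nodup_discard' _ hn)]
        have := length_discard_add_one hn h2
        omega
      · have hstep : stepA l x = l := by
          simp [stepA, h1, h2]
        rw [hstep, if_neg h1, if_neg h2, ih _ hn]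

theorem gcount_perm (R : List Int) : ∀ {l l' : List Int}, l.Perm l' → gcount l R = gcount l' R := by
  induction R with
  | nil => intro l l' _; rfl
  | cons x R' ih =>
    intro l l' hp
    simp only [gcount]
    by_cases h1 : (x - 1) ∈ l
    · have hd : (PySem.Set.discard l (x - 1)).Perm (PySem.Set.discard l' (x - 1)) := hp.filter _
      rw [if_pos h1, if_pos (hp.mem_iff.mp h1), ih hd]
    · rw [if_neg h1, if_neg (fun h => h1 (hp.mem_iff.mpr h))]
      by_cases h2 : (x + 1) ∈ l
      · have hd : (PySem.Set.discard l (x + 1)).Perm (PySem.Set.discard l' (x + 1)) := hp.filter _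
        rw [if_pos h2, if_pos (hp.mem_iff.mp h2), ih hd]
      · rw [if_neg h2, if_neg (fun h => h2 (hp.mem_iff.mpr h)), ih hp]

theorem twoPtr_nil_right (L : List Int) : twoPtr L [] = 0 := by
  cases L <;> simp [twoPtr]

theorem twoPtr_nil_left (R : List Int) : twoPtr [] R = 0 := by
  cases R <;> simp [twoPtr]

theorem twoPtr_skip (D : List Int) : ∀ (T R : List Int), (∀ a ∈ D, ∀ y ∈ R, a + 1 < y) →
    twoPtr (D ++ T) R = twoPtr T R := by
  induction D with
  | nil => intro T R _; rfl
  | cons a D' ih =>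
    intro T R h
    cases R with
    | nil => rw [twoPtr_nil_right, twoPtr_nil_right]
    | cons y R' =>
      have hy : a + 1 < y := h a (List.mem_cons_self) y (List.mem_cons_self)
      show twoPtr (a :: (D' ++ T)) (y :: R') = _
      rw [twoPtr, if_pos hy]
      exact ih T (y :: R') (fun b hb => h b (List.mem_cons_of_mem _ hb))

-- removing an element sitting between two runs that do not contain it
theorem discard_middle (D T' : List Int) (a : Int) (hD : ∀ b ∈ D, b ≠ a) (hT : ∀ b ∈ T', b ≠ a) :
    PySem.Set.discard (D ++ a :: T') a = D ++ T' := by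
  simp only [PySem.Set.discard, List.filter_append, List.filter_cons]
  rw [List.filter_eq_self.mpr (by intro b hb; simpa using hD b hb),
      List.filter_eq_self.mpr (by intro b hb; simpa using hT b hb)]
  simp

-- the heart of the equivalence: on a strictly sorted needy list S disjoint from the
-- sorted reserve list R, the two-pointer count equals A's greedy match count
theorem twoPtr_eq_gcount (R : List Int) : ∀ (S : List Int), List.Pairwise (· < ·) S →
    List.Pairwise (· < ·) R → (∀ x ∈ R, x ∉ S) → twoPtr S R = gcount S R := by
  induction R with
  | nil => intro S _ _ _; rw [twoPtr_nil_right]; rfl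
  | cons x R' ih =>
    intro S hS hR hdisj
    have hR' : List.Pairwise (· < ·) R' := hR.tail
    have hxR' : ∀ y ∈ R', x < y := fun y hy => (List.pairwise_cons.mp hR).1 y hy
    have hdisj' : ∀ y ∈ R', y ∉ S := fun y hy => hdisj y (List.mem_cons_of_mem _ hy)
    set p : Int → Bool := fun a => decide (a + 1 < x) with hp
    set D := S.takeWhile p with hDdef
    set T := S.dropWhile p with hTdef
    have hsplit : D ++ T = S := List.takeWhile_append_dropWhile
    have hD : ∀ a ∈ D, a + 1 < x := by
      intro a ha
      have := List.mem_takeWhile_imp ha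
      simpa [hp] using this
    have hDR : ∀ a ∈ D, ∀ y ∈ x :: R', a + 1 < y := by
      intro a ha y hy
      rcases List.mem_cons.mp hy with rfl | hy'
      · exact hD a ha
      · exact lt_trans (hD a ha) (hxR' y hy')
    have hDR' : ∀ a ∈ D, ∀ y ∈ R', a + 1 < y :=
      fun a ha y hy => hDR a ha y (List.mem_cons_of_mem _ hy)
    cases hT : T with
    | nil =>
      have hSD : S = D := by rw [← hsplit, hT, List.append_nil]
      have h1 : (x - 1) ∉ S := by
        intro hmem
        have := hD _ (hSD ▸ hmem)
        omega
      have h2 : (x + 1) ∉ S := by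
        intro hmem
        have := hD _ (hSD ▸ hmem)
        omega
      rw [gcount, if_neg h1, if_neg h2, ← ih S hS hR' hdisj']
      have e1 : twoPtr S (x :: R') = 0 := by
        conv_lhs => rw [hSD, ← List.append_nil D]
        rw [twoPtr_skip D [] _ (fun a ha y hy => hDR a ha y hy), twoPtr_nil_left]
      have e2 : twoPtr S R' = 0 := by
        conv_lhs => rw [hSD, ← List.append_nil D]
        rw [twoPtr_skip D [] _ (fun a ha y hy => hDR' a ha y hy), twoPtr_nil_left]
      rw [e1, e2]
    | cons a T' =>
      have hT2 : List.dropWhile p S = a :: T' := by rw [← hTdef]; exact hT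
      have hSD : S = D ++ a :: T' := by rw [← hsplit, hT]
      have hpa : p a = false := by
        have hw : List.dropWhile p S ≠ [] := by rw [hT2]; simp
        have hhead := List.head_dropWhile_not p hw
        simpa [hT2] using hhead
      have hax : ¬ (a + 1 < x) := by simpa [hp] using hpa
      have haS : a ∈ S := by rw [hSD]; simp
      have hane : a ≠ x := fun h => hdisj x List.mem_cons_self (h ▸ haS)
      have hpairs := hSD ▸ hS
      have hT'gt : ∀ b ∈ T', a < b :=
        (List.pairwise_cons.mp (List.pairwise_append.mp hpairs).2.1).1
      have hDa : ∀ b ∈ D, b < a :=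
        fun b hb => (List.pairwise_append.mp hpairs).2.2 b hb a List.mem_cons_self
      have hmem1 : (x - 1) ∈ S ↔ a = x - 1 := by
        rw [hSD]
        simp only [List.mem_append, List.mem_cons]
        constructor
        · rintro (hD' | rfl | hT'')
          · exact absurd (hD _ hD') (by omega)
          · rfl
          · have := hT'gt _ hT''
            omega
        · intro h; right; left; exact h.symm
      -- the sublist facts for the two matching branches
      have hsub : (D ++ T').Sublist S := by
        rw [hSD]
        exact List.Sublist.append (List.Sublist.refl D) (List.sublist_cons_self a T')
      have hpair' : List.Pairwise (· < ·) (D ++ T') := hS.sublist hsub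
      have hdisj'' : ∀ y ∈ R', y ∉ D ++ T' := fun y hy hmem => hdisj' y hy (hsub.mem hmem)
      by_cases hcase : a = x - 1
      · -- A removes x-1; B matches L[i] = x-1 with x
        rw [gcount, if_pos (hmem1.mpr hcase)]
        have hdisc : PySem.Set.discard S (x - 1) = D ++ T' := by
          rw [hSD, ← hcase]
          exact discard_middle D T' a (fun b hb => by have := hDa b hb; omega)
            (fun b hb => by have := hT'gt b hb; omega)
        have e1 : twoPtr S (x :: R') = 1 + twoPtr T' R' := by
          rw [hSD, twoPtr_skip D (a :: T') _ hDR, twoPtr, if_neg (by omega), if_neg (by omega)]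
        rw [e1, hdisc, ← ih (D ++ T') hpair' hR' hdisj'',
          twoPtr_skip D T' R' hDR']
      · by_cases hcase2 : a = x + 1
        · -- A removes x+1; B matches L[i] = x+1 with x
          have h1 : (x - 1) ∉ S := fun h => hcase (hmem1.mp h)
          have h2 : (x + 1) ∈ S := by rw [hSD, ← hcase2]; simp
          rw [gcount, if_neg h1, if_pos h2]
          have hdisc : PySem.Set.discard S (x + 1) = D ++ T' := by
            rw [hSD, ← hcase2]
            exact discard_middle D T' a (fun b hb => by have := hDa b hb; omega)
              (fun b hb => by have := hT'gt b hb; omega)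
          have e1 : twoPtr S (x :: R') = 1 + twoPtr T' R' := by
            rw [hSD, twoPtr_skip D (a :: T') _ hDR, twoPtr, if_neg (by omega), if_neg (by omega)]
          rw [e1, hdisc, ← ih (D ++ T') hpair' hR' hdisj'',
            twoPtr_skip D T' R' hDR']
        · -- a ≥ x + 2: x cannot match anything, both sides move to R'
          have hagt : x + 1 < a := by omega
          have h1 : (x - 1) ∉ S := fun h => hcase (hmem1.mp h)
          have h2 : (x + 1) ∉ S := by
            rw [hSD]
            simp only [List.mem_append, List.mem_cons]
            rintro (hD' | heq | hT'')
            · exact absurd (hD _ hD') (by omega)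
            · exact hcase2 heq.symm
            · have := hT'gt _ hT''
              omega
          rw [gcount, if_neg h1, if_neg h2]
          have e1 : twoPtr S (x :: R') = twoPtr S R' := by
            conv_lhs => rw [hSD]
            rw [twoPtr_skip D (a :: T') _ hDR, twoPtr, if_neg hax, if_pos hagt,
              ← twoPtr_skip D (a :: T') R' hDR', ← hSD]
          rw [e1, ih S hS hR' hdisj']

theorem pairwise_lt_sorted {l : List Int} (h : l.Nodup) :
    List.Pairwise (· < ·) (PySem.List.sorted l (fun x => x) false) := by
  have hle := PySem.List.sorted_pairwise l (fun x => x)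
  have hnd : (PySem.List.sorted l (fun x => x) false).Nodup :=
    ((PySem.List.sorted_perm l (fun x => x) false).nodup_iff).mpr h
  exact (hle.and hnd).imp (fun h => lt_of_le_of_ne h.1 h.2)

theorem sorted_congr {l l' : List Int} (hn : l.Nodup) (hn' : l'.Nodup)
    (hmem : ∀ a, a ∈ l ↔ a ∈ l') :
    PySem.List.sorted l (fun x => x) false = PySem.List.sorted l' (fun x => x) false := by
  have hperm : (PySem.List.sorted l (fun x => x) false).Perm (PySem.List.sorted l' (fun x => x) false) :=
    ((PySem.List.sorted_perm l _ false).trans ((List.perm_ext_iff_of_nodup hn hn').mpr hmem)).trans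
      (PySem.List.sorted_perm l' _ false).symm
  exact List.Perm.eq_of_pairwise (fun a b _ _ h1 h2 => le_antisymm h1 h2)
    (PySem.List.sorted_pairwise l _) (PySem.List.sorted_pairwise l' _) hperm

theorem solution_eq (n : Int) (lost : List Int) (reserve : List Int) :
    solution n lost reserve = solution_alt n lost reserve := by
  simp only [solution, solution_alt]
  set s := PySem.Set.inter (PySem.Set.ofList lost) (PySem.Set.ofList reserve) with hs
  set l0 := PySem.Set.diff (PySem.Set.ofList lost) s with hl0
  set r0 := PySem.Set.diff (PySem.Set.ofList reserve) s with hr0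
  have hnl : l0.Nodup := PySem.Set.nodup_diff _ _ (PySem.Set.nodup_ofList _)
  have hnr : r0.Nodup := PySem.Set.nodup_diff _ _ (PySem.Set.nodup_ofList _)
  have hnl' : (PySem.Set.diff (PySem.Set.ofList lost) (PySem.Set.ofList reserve)).Nodup :=
    PySem.Set.nodup_diff _ _ (PySem.Set.nodup_ofList _)
  have hnr' : (PySem.Set.diff (PySem.Set.ofList reserve) (PySem.Set.ofList lost)).Nodup :=
    PySem.Set.nodup_diff _ _ (PySem.Set.nodup_ofList _)
  have hmemL : ∀ a, a ∈ l0 ↔ a ∈ PySem.Set.diff (PySem.Set.ofList lost) (PySem.Set.ofList reserve) := by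
    intro a
    simp only [hl0, hs, PySem.Set.mem_diff, PySem.Set.mem_inter, PySem.Set.mem_ofList]
    tauto
  have hmemR : ∀ a, a ∈ r0 ↔ a ∈ PySem.Set.diff (PySem.Set.ofList reserve) (PySem.Set.ofList lost) := by
    intro a
    simp only [hr0, hs, PySem.Set.mem_diff, PySem.Set.mem_inter, PySem.Set.mem_ofList]
    tauto
  have hLeq : PySem.List.sorted (PySem.Set.diff (PySem.Set.ofList lost) (PySem.Set.ofList reserve)) (fun x => x) false
      = PySem.List.sorted l0 (fun x => x) false := sorted_congr hnl' hnl (fun a => (hmemL a).symm)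
  have hReq : PySem.List.sorted (PySem.Set.diff (PySem.Set.ofList reserve) (PySem.Set.ofList lost)) (fun x => x) false
      = PySem.List.sorted r0 (fun x => x) false := sorted_congr hnr' hnr (fun a => (hmemR a).symm)
  rw [hLeq, hReq]
  set SL := PySem.List.sorted l0 (fun x => x) false with hSL
  set SR := PySem.List.sorted r0 (fun x => x) false with hSR
  have hlenfold : ((SR.foldl stepA l0).length : Int) = (l0.length : Int) - gcount l0 SR :=
    foldA_length SR l0 hnl
  have hdisjSR : ∀ x ∈ SR, x ∉ SL := by
    intro x hx hxS
    have hxr : x ∈ r0 := (PySem.List.sorted_perm r0 _ false).mem_iff.mp hx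
    have hxl : x ∈ l0 := (PySem.List.sorted_perm l0 _ false).mem_iff.mp hxS
    simp only [hl0, hr0, hs, PySem.Set.mem_diff, PySem.Set.mem_inter, PySem.Set.mem_ofList] at hxr hxl
    tauto
  have htg : twoPtr SL SR = gcount SL SR :=
    twoPtr_eq_gcount SR SL (pairwise_lt_sorted hnl) (pairwise_lt_sorted hnr) hdisjSR
  have hgp : gcount SL SR = gcount l0 SR := gcount_perm SR (PySem.List.sorted_perm l0 _ false)
  have hlen : SL.length = l0.length := (PySem.List.sorted_perm l0 (fun x => x) false).length_eq
  rw [hlenfold, htg, hgp, hlen]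

-- ===== VERDICT (by name: the statement is the Claim_ definition above) =====
theorem solution_spec : Claim_equal_solution := by
  intro n lost reserve _
  unfold Spec_solution
  exact solution_eq n lost reserve
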